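-- pv_equiv track=rewrite | github.com/leezzangmin/pythonBOJ | 프로그래머스/모의고사.py | solution
-- ===== SOURCE A (Python) =====
-- def solution(answers):
--     answer = []
--
--     number1=[1,2,3,4,5]
--     number2=[2,1,2,3,2,4,2,5]
--     number3=[3,3,1,1,2,2,4,4,5,5]
--
--     temp_score=0
--     score=0
--
--     j=0
--     for i in range(len(answers)):
--         if j==len(number1):
--             j=j%len(number1)
--         if answers[i]==number1[j]:
--             temp_score+=1
--         j+=1
--
--     score=temp_score
--     answer=[1]
--
--
--
--     temp_score=0
--     j=0
--     for i in range(len(answers)):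
--         if j==len(number2):
--             j=j%len(number2)
--         if answers[i]==number2[j]:
--             temp_score+=1
--         j+=1
--     if temp_score==score:
--         answer.append(2)
--     elif temp_score>score:
--         score=temp_score
--         answer=[2]
--
--
--
--     temp_score=0
--     j=0
--     for i in range(len(answers)):
--         if j==len(number3):
--             j=j%len(number3)
--         if answers[i]==number3[j]:
--             temp_score+=1
--         j+=1
--
--     if temp_score==score:
--         answer.append(3)
--     elif temp_score>score:
--         answer=[3]
--     return answer
-- ===== SOURCE B (Python) =====
-- def solution(answers):
--     patterns = [[1, 2, 3, 4, 5],
--                 [2, 1, 2, 3, 2, 4, 2, 5],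
--                 [3, 3, 1, 1, 2, 2, 4, 4, 5, 5]]
--     # One pass: bucket the answers into a frequency table keyed by
--     # (position mod 40, value); 40 = lcm(5, 8, 10), the joint period.
--     freq = {}
--     for i, a in enumerate(answers):
--         k = (i % 40, a)
--         freq[k] = freq.get(k, 0) + 1
--     # Each score is a fixed 40-term lookup sum -- no rescan of answers.
--     scores = [sum(freq.get((r, p[r % len(p)]), 0) for r in range(40))
--               for p in patterns]
--     best = max(scores)
--     return [k + 1 for k, s in enumerate(scores) if s == best]
-- ===== Notes on version B (the rewrite author's own statement) =====
-- stated objective: alternative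
-- what changed: A scans answers three times, once per pattern, tracking a running best with append/replace bookkeeping; B never compares answers against a pattern directly: one pass buckets answers into a frequency table keyed by (position mod 40, value) -- 40 being the joint period of the three patterns -- then each score is a fixed 40-term table-lookup sum and winners are selected by max() plus a comprehension.
import Mathlib
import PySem

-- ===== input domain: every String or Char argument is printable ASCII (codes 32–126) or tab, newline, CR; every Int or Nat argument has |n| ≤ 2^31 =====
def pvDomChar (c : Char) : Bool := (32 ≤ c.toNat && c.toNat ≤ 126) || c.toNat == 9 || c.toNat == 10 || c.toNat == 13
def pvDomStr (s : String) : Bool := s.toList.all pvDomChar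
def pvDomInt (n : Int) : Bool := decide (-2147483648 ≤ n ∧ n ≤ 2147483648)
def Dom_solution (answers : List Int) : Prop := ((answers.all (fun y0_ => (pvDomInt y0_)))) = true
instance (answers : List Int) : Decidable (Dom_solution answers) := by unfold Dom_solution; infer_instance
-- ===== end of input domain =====

-- B replaces A's three per-pattern scans with one bucketing pass into a frequency
-- table keyed by (position mod 40, value); scores become fixed 40-term lookup sums
-- (objective: alternative).

-- ===== PORT A =====
-- A's three identical counting loops (state: temp_score and the wrapping cursor j),
-- transliterated once and invoked three times exactly as A runs them.
def solveLoopA (p : List Int) (answers : List Int) : Int :=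
  (answers.foldl (fun (st : Int × Int) a =>
      let j := if st.2 = (p.length : Int) then PySem.Int.mod st.2 (p.length : Int) else st.2
      (if a = PySem.List.pyGetD p j 0 then st.1 + 1 else st.1, j + 1))
    (0, 0)).1

def solution (answers : List Int) : List Int :=
  let number1 : List Int := [1, 2, 3, 4, 5]
  let number2 : List Int := [2, 1, 2, 3, 2, 4, 2, 5]
  let number3 : List Int := [3, 3, 1, 1, 2, 2, 4, 4, 5, 5]
  let score := solveLoopA number1 answers
  let answer : List Int := [1]
  let t2 := solveLoopA number2 answers
  let as2 : List Int × Int :=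
    if t2 = score then (answer ++ [2], score)
    else if t2 > score then ([2], t2)
    else (answer, score)
  let t3 := solveLoopA number3 answers
  if t3 = as2.2 then as2.1 ++ [3]
  else if t3 > as2.2 then [3]
  else as2.1

-- ===== PORT B =====
def solution_alt (answers : List Int) : List Int :=
  let patterns : List (List Int) :=
    [[1, 2, 3, 4, 5], [2, 1, 2, 3, 2, 4, 2, 5], [3, 3, 1, 1, 2, 2, 4, 4, 5, 5]]
  let freq : PySem.Dict (Int × Int) Int :=
    (PySem.List.enumerate answers 0).foldl
      (fun d ia =>
        let k := (PySem.Int.mod ia.1 40, ia.2)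
        d.insert k (d.getD k 0 + 1))
      PySem.Dict.empty
  let scores : List Int := patterns.map (fun p =>
    ((PySem.List.pyRange 0 40 1).map (fun r =>
        freq.getD (r, PySem.List.pyGetD p (PySem.Int.mod r (p.length : Int)) 0) 0)).sum)
  let best : Int := (PySem.List.max? scores (fun s => s)).getD 0
  (PySem.List.enumerate scores 0).filterMap (fun ks =>
    if ks.2 = best then some (ks.1 + 1) else none)

-- ===== PRECONDITION & SPEC =====
def Spec_solution (answers : List Int) (out : List Int) : Prop := out = solution_alt answers
instance (answers : List Int) (out : List Int) : Decidable (Spec_solution answers out) := by unfold Spec_solution; infer_instance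

-- ===== CLAIM (what is proved, stated in full; the proofs are below) =====
def Claim_equal_solution : Prop := ∀ (answers : List Int), Dom_solution answers → Spec_solution answers (solution answers)

-- ===== LEMMAS AND PROOFS =====

-- cyclic match count of xs against p starting at in-range cursor s
def cnt (p : List Int) : List Int → Nat → Int
  | [], _ => 0
  | a :: r, s => (if a = p.getD s 0 then 1 else 0) + cnt p r ((s + 1) % p.length)

lemma solveLoopA_cnt (p : List Int) (hp : p ≠ []) :
    ∀ (xs : List Int) (t : Int) (jn : Nat), jn ≤ p.length →
      (xs.foldl (fun (st : Int × Int) a =>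
        let j := if st.2 = (p.length : Int) then PySem.Int.mod st.2 (p.length : Int) else st.2
        (if a = PySem.List.pyGetD p j 0 then st.1 + 1 else st.1, j + 1)) (t, (jn : Int))).1
      = t + cnt p xs (jn % p.length) := by
  intro xs
  have hlen : 0 < p.length := List.length_pos_iff.mpr hp
  induction xs with
  | nil => intro t jn _; simp [cnt]
  | cons a r ih =>
    intro t jn hj
    have hj2 : (if ((jn : Int)) = (p.length : Int) then PySem.Int.mod (jn : Int) (p.length : Int) else (jn : Int))
        = ((jn % p.length : Nat) : Int) := by
      by_cases h : jn = p.length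
      · simp [h, PySem.Int.mod_natCast]
      · have hlt : jn < p.length := lt_of_le_of_ne hj h
        have h' : ¬ ((jn : Int) = (p.length : Int)) := by exact_mod_cast h
        simp [h', Nat.mod_eq_of_lt hlt]
    have hcast : ((jn % p.length : Nat) : Int) + 1 = ((jn % p.length + 1 : Nat) : Int) := by push_cast; ring
    have hstep : (let j := if (t, (jn : Int)).2 = (p.length : Int) then PySem.Int.mod (t, (jn : Int)).2 (p.length : Int) else (t, (jn : Int)).2
        (if a = PySem.List.pyGetD p j 0 then (t, (jn : Int)).1 + 1 else (t, (jn : Int)).1, j + 1))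
        = (if a = PySem.List.pyGetD p ((jn % p.length : Nat) : Int) 0 then t + 1 else t,
           ((jn % p.length + 1 : Nat) : Int)) := by
      simp only [hj2, hcast]
    have hle : jn % p.length + 1 ≤ p.length := by
      have := Nat.mod_lt jn hlen; omega
    rw [List.foldl_cons, hstep, ih _ (jn % p.length + 1) hle]
    simp only [cnt, PySem.List.pyGetD_natCast]
    split_ifs <;> ring

lemma solveLoopA_eq (p : List Int) (hp : p ≠ []) (answers : List Int) :
    solveLoopA p answers = cnt p answers 0 := by
  unfold solveLoopA
  have h := solveLoopA_cnt p hp answers 0 0 (Nat.zero_le _)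
  simpa using h

-- B's frequency table is Counter of the (i % 40, a) key list
lemma freq_eq_counter (answers : List Int) :
    (PySem.List.enumerate answers 0).foldl
      (fun (d : PySem.Dict (Int × Int) Int) ia =>
        let k := (PySem.Int.mod ia.1 40, ia.2)
        d.insert k (d.getD k 0 + 1))
      PySem.Dict.empty
    = PySem.Dict.counter ((PySem.List.enumerate answers 0).map
        (fun ia => (PySem.Int.mod ia.1 40, ia.2))) := by
  rw [← PySem.Dict.foldl_insert_getD_add_one_eq_counter, List.foldl_map]

-- a 40-term one-hot sum: exactly one r in range(40) equals m
lemma hit_sum (f : Int → Int) (m a : Int) (hm0 : 0 ≤ m) (hm40 : m < 40) :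
    ((PySem.List.pyRange 0 40 1).map
        (fun r => if ((m, a) : Int × Int) = (r, f r) then (1 : Int) else 0)).sum
      = if a = f m then 1 else 0 := by
  rw [PySem.List.pyRange_one_append 0 m 40 hm0 (le_of_lt hm40),
      PySem.List.pyRange_one_cons hm40, List.map_append, List.sum_append,
      List.map_cons, List.sum_cons]
  have h1 : ((PySem.List.pyRange 0 m 1).map
      (fun r => if ((m, a) : Int × Int) = (r, f r) then (1 : Int) else 0)).sum = 0 := by
    apply List.sum_eq_zero
    intro x hx
    obtain ⟨r, hr, hrx⟩ := List.mem_map.mp hx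
    have := (PySem.List.mem_pyRange_one.mp hr).2
    have hne : ((m, a) : Int × Int) ≠ (r, f r) := by
      intro h; exact absurd (congrArg Prod.fst h) (by simp; omega)
    simp [hne] at hrx; omega
  have h2 : ((PySem.List.pyRange (m + 1) 40 1).map
      (fun r => if ((m, a) : Int × Int) = (r, f r) then (1 : Int) else 0)).sum = 0 := by
    apply List.sum_eq_zero
    intro x hx
    obtain ⟨r, hr, hrx⟩ := List.mem_map.mp hx
    have := (PySem.List.mem_pyRange_one.mp hr).1
    have hne : ((m, a) : Int × Int) ≠ (r, f r) := by
      intro h; exact absurd (congrArg Prod.fst h) (by simp; omega)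
    simp [hne] at hrx; omega
  rw [h1, h2]
  by_cases h : a = f m
  · simp [h]
  · have hne : ((m, a) : Int × Int) ≠ (m, f m) := by
      intro hh; exact h (congrArg Prod.snd hh)
    simp [hne, h]


-- B's 40-term lookup sum over the bucketed keys equals the cyclic match count
lemma scoreB_cnt (p : List Int) (hd : p.length ∣ 40) :
    ∀ (xs : List Int) (n : Nat),
      ((PySem.List.pyRange 0 40 1).map (fun r =>
          (((PySem.List.enumerate xs (n : Int)).map
              (fun ia => (PySem.Int.mod ia.1 40, ia.2))).count
            (r, PySem.List.pyGetD p (PySem.Int.mod r (p.length : Int)) 0) : Int))).sum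
      = cnt p xs (n % p.length) := by
  intro xs
  induction xs with
  | nil => intro n; simp [PySem.List.enumerate_nil, cnt]
  | cons a r ih =>
    intro n
    have hcast : ((n : Int) + 1) = ((n + 1 : Nat) : Int) := by push_cast; ring
    rw [PySem.List.enumerate_cons, List.map_cons]
    have hcnt : ∀ q : Int × Int,
        ((((PySem.Int.mod (n : Int) 40, a)) ::
            ((PySem.List.enumerate r ((n : Int) + 1)).map
              (fun ia => (PySem.Int.mod ia.1 40, ia.2)))).count q : Int)
        = (((PySem.List.enumerate r ((n : Int) + 1)).map
              (fun ia => (PySem.Int.mod ia.1 40, ia.2))).count q : Int)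
          + (if ((PySem.Int.mod (n : Int) 40, a) : Int × Int) = q then 1 else 0) := by
      intro q
      rw [List.count_cons]
      by_cases h : ((PySem.Int.mod (n : Int) 40, a) : Int × Int) = q
      · subst h; simp
      · simp
    simp only [hcnt]
    rw [PySem.List.sum_map_add_int]
    rw [hcast, ih (n + 1)]
    have hm : PySem.Int.mod (n : Int) 40 = ((n % 40 : Nat) : Int) := by
      exact_mod_cast PySem.Int.mod_natCast n 40
    have hsum := hit_sum
      (fun r => PySem.List.pyGetD p (PySem.Int.mod r (p.length : Int)) 0)
      ((n % 40 : Nat) : Int) a (by positivity)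
      (by exact_mod_cast Nat.mod_lt n (by omega))
    rw [hm, hsum]
    have hpred : PySem.List.pyGetD p
        (PySem.Int.mod ((n % 40 : Nat) : Int) (p.length : Int)) 0
        = p.getD (n % p.length) 0 := by
      rw [show ((n % 40 : Nat) : Int) = (((n % 40 : Nat) : Nat) : Int) from rfl,
          PySem.Int.mod_natCast, PySem.List.pyGetD_natCast,
          Nat.mod_mod_of_dvd n hd]
    simp only [hpred]
    simp only [cnt]
    rw [Nat.mod_add_mod]
    ring

lemma sel_eq (a b c : Int) :
    (let as2 : List Int × Int :=
        if b = a then (([1] : List Int) ++ [2], a)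
        else if b > a then ([2], b)
        else ([1], a)
      if c = as2.2 then as2.1 ++ [3]
      else if c > as2.2 then [3]
      else as2.1)
    = (PySem.List.enumerate [a, b, c] 0).filterMap (fun ks =>
        if ks.2 = ((PySem.List.max? [a, b, c] (fun s => s)).getD 0) then some (ks.1 + 1) else none) := by
  simp only [PySem.List.max?_id_cons, List.foldl, Option.getD,
    PySem.List.enumerate_cons, PySem.List.enumerate_nil,
    List.filterMap_cons, List.filterMap_nil]
  split_ifs <;> first | rfl | (exfalso; omega)

-- ===== VERDICT (by name: the statement is the Claim_ definition above) =====
theorem solution_spec : Claim_equal_solution := by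
  intro answers _
  unfold Spec_solution solution solution_alt
  rw [freq_eq_counter]
  simp only [List.map_cons, List.map_nil, PySem.Dict.getD_counter]
  have b1 := scoreB_cnt [1, 2, 3, 4, 5] (by norm_num) answers 0
  have b2 := scoreB_cnt [2, 1, 2, 3, 2, 4, 2, 5] (by norm_num) answers 0
  have b3 := scoreB_cnt [3, 3, 1, 1, 2, 2, 4, 4, 5, 5] (by norm_num) answers 0
  simp only [Nat.cast_zero, Nat.zero_mod] at b1 b2 b3
  simp only [b1, b2, b3,
      solveLoopA_eq [1, 2, 3, 4, 5] (by simp) answers,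
      solveLoopA_eq [2, 1, 2, 3, 2, 4, 2, 5] (by simp) answers,
      solveLoopA_eq [3, 3, 1, 1, 2, 2, 4, 4, 5, 5] (by simp) answers]
  exact sel_eq _ _ _
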